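-- pv_equiv track=rewrite | github.com/joshuastowell25/RalphsProgram | calculation/calculation.py | calculateColumnRalphsMA
-- ===== SOURCE A (Python) =====
-- def calculateColumnRalphsMA(num, data, result):
--     part = num // 2  # integer division is done with //
--
--     originalColLength = len(result)
--     offset = max(num, originalColLength)
--
--     if (result is None):
--         result = [0] * len(data)
--
--     #extend the col size
--     if(len(result) < len(data)):
--         extension = [0] * (len(data) - len(result))
--         result = result + extension
--
--     backsum = 0
--     frontsum = 0
--
--     # Calculate the first frontsum and backsum
--     for i in range(part): #0,1,
--         backsum += data[i + offset - num]  #0+1=1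
--         frontsum += data[i + part + offset - num]  #2+3=5
--
--     #set the data point for that frontsum and backsum calculation
--     result[offset - 1] = frontsum - backsum #result[3] = 5-1 = 4
--
--     #calculate the ith index
--     for i in range(offset, len(data)):
--         backNum = data[i - num]
--         backsum -= backNum
--         #transferNum goes from the frontsum to the backsum
--         transferNum = data[i - part]
--         backsum += transferNum
--         frontsum -= transferNum
--         frontNum = data[i]
--         frontsum += frontNum
--         result[i] = frontsum - backsum
--     return result
-- ===== SOURCE B (Python) =====
-- def calculateColumnRalphsMA(num, data, result):
--     # Prefix-sum re-implementation: one prefix array replaces both running-sum loops.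
--     # Note: unlike the original, this does not mutate the caller's `result` list in place;
--     # equivalence claimed is about the return value only.
--     part = num // 2
--     R = len(result)
--     L = len(data)
--     offset = max(num, R)
--     out = result + [0] * (L - R) if R < L else list(result)
--     P = [0]
--     for x in data:
--         P.append(P[-1] + x)
--     s = offset - num
--     base = (P[s + 2 * part] - P[s + part]) - (P[s + part] - P[s]) if part > 0 else 0
--     out[offset - 1] = base
--     for i in range(offset, L):
--         out[i] = base + (P[i + 1] - P[offset]) \
--                  - 2 * (P[i - part + 1] - P[offset - part]) \
--                  + (P[i - num + 1] - P[s])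
--     return out
-- ===== Notes on version B (the rewrite author's own statement) =====
-- stated objective: alternative
-- what changed: Replaced both running-sum loops (initial window build-up and the per-index subtract/transfer/add recurrence) by one prefix-sum array, from which every output value is computed directly as a closed-form combination of four prefix differences; B also does not mutate the caller's result list (return value is identical).
import Mathlib
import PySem

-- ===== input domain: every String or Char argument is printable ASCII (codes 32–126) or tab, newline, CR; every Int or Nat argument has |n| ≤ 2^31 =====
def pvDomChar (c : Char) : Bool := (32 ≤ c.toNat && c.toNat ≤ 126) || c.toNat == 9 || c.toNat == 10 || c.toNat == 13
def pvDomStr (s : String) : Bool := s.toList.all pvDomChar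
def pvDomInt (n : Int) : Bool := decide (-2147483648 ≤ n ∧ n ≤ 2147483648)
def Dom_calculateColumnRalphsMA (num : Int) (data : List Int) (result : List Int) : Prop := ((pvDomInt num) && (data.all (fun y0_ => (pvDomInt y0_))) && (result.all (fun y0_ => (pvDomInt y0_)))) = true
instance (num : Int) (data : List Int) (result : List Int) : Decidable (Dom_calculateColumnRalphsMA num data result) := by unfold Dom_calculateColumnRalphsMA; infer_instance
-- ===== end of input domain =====

-- B replaces A's two running-sum loops by a single prefix-sum array read off in closed form
-- (same cost class; return value only — A mutates the caller's result list in place, B does not).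


-- ===== PORT A =====
def calculateColumnRalphsMA (num : Int) (data : List Int) (result : List Int) : List Int :=
  let part := PySem.Int.floordiv num 2
  let originalColLength : Int := result.length
  let offset := max num originalColLength
  -- `if result is None` is dead code in Python (len(result) already ran); omitted
  let result := if (result.length : Int) < (data.length : Int)
    then result ++ PySem.List.pyRepeat [0] ((data.length : Int) - (result.length : Int))
    else result
  let sums := (PySem.List.pyRange 0 part 1).foldl
      (fun (s : Int × Int) i =>
        (s.1 + PySem.List.pyGetD data (i + offset - num) 0,
         s.2 + PySem.List.pyGetD data (i + part + offset - num) 0)) (0, 0)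
  let backsum := sums.1
  let frontsum := sums.2
  let result := PySem.List.pySetD result (offset - 1) (frontsum - backsum)
  let final := (PySem.List.pyRange offset (data.length : Int) 1).foldl
      (fun (st : Int × Int × List Int) i =>
        let backNum := PySem.List.pyGetD data (i - num) 0
        let backsum := st.1 - backNum
        let transferNum := PySem.List.pyGetD data (i - part) 0
        let backsum := backsum + transferNum
        let frontsum := st.2.1 - transferNum
        let frontNum := PySem.List.pyGetD data i 0
        let frontsum := frontsum + frontNum
        (backsum, frontsum, PySem.List.pySetD st.2.2 i (frontsum - backsum)))
      (backsum, frontsum, result)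
  final.2.2

-- ===== PORT B =====
def calculateColumnRalphsMA_alt (num : Int) (data : List Int) (result : List Int) : List Int :=
  let part := PySem.Int.floordiv num 2
  let R : Int := result.length
  let L : Int := data.length
  let offset := max num R
  let out := if R < L then result ++ PySem.List.pyRepeat [0] (L - R) else result
  let P := data.foldl (fun acc x => acc ++ [PySem.List.pyGetD acc (-1) 0 + x]) [0]
  let s := offset - num
  let base := if 0 < part
    then (PySem.List.pyGetD P (s + 2 * part) 0 - PySem.List.pyGetD P (s + part) 0)
         - (PySem.List.pyGetD P (s + part) 0 - PySem.List.pyGetD P s 0)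
    else 0
  let out := PySem.List.pySetD out (offset - 1) base
  (PySem.List.pyRange offset L 1).foldl
    (fun res i => PySem.List.pySetD res i
      (base + (PySem.List.pyGetD P (i + 1) 0 - PySem.List.pyGetD P offset 0)
        - 2 * (PySem.List.pyGetD P (i - part + 1) 0 - PySem.List.pyGetD P (offset - part) 0)
        + (PySem.List.pyGetD P (i - num + 1) 0 - PySem.List.pyGetD P s 0)))
    out

-- ===== PRECONDITION & SPEC =====
-- Pre_ = exactly the inputs where Python A returns: num ≥ 1 needs the initial double window
-- data[offset-num .. offset-num+2*part-1] and the slot result[offset-1] in range; for num ≤ 0 A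
-- returns only when the main loop is empty (num < 0) or num = 0 with a nonempty written list.
def Pre_calculateColumnRalphsMA (num : Int) (data : List Int) (result : List Int) : Prop :=
  (1 ≤ num ∧ num ≤ max (result.length : Int) (data.length : Int) ∧
    (num ≤ 1 ∨ max num (result.length : Int) + 2 * PySem.Int.floordiv num 2 - num ≤ (data.length : Int)))
  ∨ (num = 0 ∧ 1 ≤ max (result.length : Int) (data.length : Int))
  ∨ (num < 0 ∧ 1 ≤ (result.length : Int) ∧ (data.length : Int) ≤ (result.length : Int))
instance (num : Int) (data : List Int) (result : List Int) : Decidable (Pre_calculateColumnRalphsMA num data result) := by unfold Pre_calculateColumnRalphsMA; infer_instance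

def pvWitness_calculateColumnRalphsMA : Int × List Int × List Int := (2, ([1, 2, 3, 4], [0, 0]))

def Spec_calculateColumnRalphsMA (num : Int) (data : List Int) (result : List Int) (out : List Int) : Prop := out = calculateColumnRalphsMA_alt num data result
instance (num : Int) (data : List Int) (result : List Int) (out : List Int) : Decidable (Spec_calculateColumnRalphsMA num data result out) := by unfold Spec_calculateColumnRalphsMA; infer_instance

-- ===== CLAIM (what is proved, stated in full; the proofs are below) =====
def Claim_equal_calculateColumnRalphsMA : Prop := ∀ (num : Int) (data : List Int) (result : List Int), Dom_calculateColumnRalphsMA num data result → Pre_calculateColumnRalphsMA num data result → Spec_calculateColumnRalphsMA num data result (calculateColumnRalphsMA num data result)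

-- ===== LEMMAS AND PROOFS =====

/-- Sum of the first `j` (clamped) data values: what the prefix array holds at index `j`. -/
def pvT (data : List Int) (j : Int) : Int := (data.take j.toNat).sum

/-- Common closed form both ports are reduced to. -/
def pvCanon (num : Int) (data : List Int) (result : List Int) : List Int :=
  let part := PySem.Int.floordiv num 2
  let offset := max num (result.length : Int)
  let V := if 0 < part
    then (pvT data (offset - num + 2 * part) - pvT data (offset - num + part))
         - (pvT data (offset - num + part) - pvT data (offset - num))
    else 0
  let ext := if (result.length : Int) < (data.length : Int)
    then result ++ PySem.List.pyRepeat [0] ((data.length : Int) - (result.length : Int))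
    else result
  (PySem.List.pyRange offset (data.length : Int) 1).foldl
    (fun r i => PySem.List.pySetD r i
      (V + (pvT data (i + 1) - pvT data offset)
        - 2 * (pvT data (i - part + 1) - pvT data (offset - part))
        + (pvT data (i - num + 1) - pvT data (offset - num))))
    (PySem.List.pySetD ext (offset - 1) V)

theorem pvT_succ (data : List Int) (k : Int) (h0 : 0 ≤ k) (hk : k < (data.length : Int)) :
    pvT data (k + 1) = pvT data k + PySem.List.pyGetD data k 0 := by
  have hk' : k.toNat < data.length := by omega
  rw [pvT, pvT, PySem.List.pyGetD_eq_getElem (h0 := h0) (h1 := hk)]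
  have h2 : (k+1).toNat = k.toNat + 1 := by omega
  rw [h2]
  exact List.sum_take_succ data k.toNat hk'

theorem pvP_aux (data : List Int) : ∀ (acc : List Int) (x0 : Int),
    data.foldl (fun acc x => acc ++ [PySem.List.pyGetD acc (-1) 0 + x]) (acc ++ [x0])
      = acc ++ [x0] ++ (List.range data.length).map (fun k => x0 + (data.take (k + 1)).sum) := by
  induction data with
  | nil => intro acc x0; simp
  | cons x xs ih =>
    intro acc x0
    rw [List.foldl_cons]
    have hstep : (acc ++ [x0]) ++ [PySem.List.pyGetD (acc ++ [x0]) (-1) 0 + x]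
        = (acc ++ [x0]) ++ [x0 + x] := by
      rw [PySem.List.pyGetD_neg_one_append_singleton]
    rw [hstep, ih (acc ++ [x0]) (x0 + x)]
    rw [List.length_cons, List.range_succ_eq_map]
    simp [List.map_map, Function.comp, add_assoc]

theorem pvP_get (data : List Int) (j : Int) (h0 : 0 ≤ j) (hj : j ≤ (data.length : Int)) :
    PySem.List.pyGetD (data.foldl (fun acc x => acc ++ [PySem.List.pyGetD acc (-1) 0 + x]) [0]) j 0
      = pvT data j := by
  have hbase : ([0] : List Int) = [] ++ [0] := rfl
  rw [hbase, pvP_aux data [] 0]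
  have hjl : j < ((([] : List Int) ++ [0] ++ (List.range data.length).map (fun k => 0 + (data.take (k + 1)).sum)).length : Int) := by
    simp; omega
  rw [PySem.List.pyGetD_eq_getElem (h0 := h0) (h1 := hjl)]
  rcases Nat.eq_zero_or_eq_succ_pred j.toNat with h | h
  · have hj0 : j = 0 := by omega
    subst hj0
    simp [pvT]
  · have hk : j.toNat - 1 < data.length := by omega
    have h1 : 1 ≤ j.toNat := by omega
    rw [pvT]
    simp only [List.nil_append]
    rw [List.getElem_append_right (by simpa using h1)]
    simp only [List.length_singleton]
    rw [List.getElem_map, List.getElem_range]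
    have e : j.toNat - 1 + 1 = j.toNat := by omega
    rw [e]
    simp

theorem pv_sum_loop (data : List Int) : ∀ (n : Nat) (a c acc : Int), 0 ≤ a + c →
    a + n + c ≤ (data.length : Int) →
    (PySem.List.pyRange a (a + n) 1).foldl (fun s i => s + PySem.List.pyGetD data (i + c) 0) acc
      = acc + pvT data (a + n + c) - pvT data (a + c) := by
  intro n
  induction n with
  | zero => intro a c acc h1 h2; simp
  | succ n ih =>
    intro a c acc h1 h2
    rw [PySem.List.pyRange_one_cons (by push_cast; omega)]
    rw [List.foldl_cons]
    have e1 : a + ((n : Int) + 1) = (a + 1) + (n : Int) := by ring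
    push_cast
    rw [e1]
    rw [ih (a + 1) c (acc + PySem.List.pyGetD data (a + c) 0) (by omega) (by push_cast at h2 ⊢; omega)]
    have hs := pvT_succ data (a + c) h1 (by push_cast at h2; omega)
    have e2 : a + 1 + c = a + c + 1 := by ring
    rw [e2, hs]
    have e3 : a + 1 + (n : Int) + c = a + ((n : Int) + 1) + c := by ring
    rw [e3]
    ring

/-- `range(0, b)` version of `pv_sum_loop`. -/
theorem pv_sum_loop' (data : List Int) (b c acc : Int) (hb : 0 ≤ b) (hc : 0 ≤ c)
    (h2 : b + c ≤ (data.length : Int)) :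
    (PySem.List.pyRange 0 b 1).foldl (fun s i => s + PySem.List.pyGetD data (i + c) 0) acc
      = acc + pvT data (b + c) - pvT data c := by
  have hbn : b = (0 : Int) + ((b.toNat : Nat) : Int) := by omega
  rw [hbn, pv_sum_loop data b.toNat 0 c acc (by omega) (by omega)]
  have e1 : (0 : Int) + ((b.toNat : Nat) : Int) + c = b + c := by omega
  have e2 : (0 : Int) + c = c := by omega
  rw [e1, e2]

theorem pv_loop_eq (data : List Int) (num part offset base : Int)
    (h0p : 0 ≤ part) (hpn : part ≤ num) (hno : num ≤ offset) :
    ∀ (n : Nat) (a back front : Int) (res : List Int), offset ≤ a →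
    a + n = (data.length : Int) →
    front - back = base + (pvT data a - pvT data offset)
      - 2 * (pvT data (a - part) - pvT data (offset - part))
      + (pvT data (a - num) - pvT data (offset - num)) →
    ((PySem.List.pyRange a (a + n) 1).foldl
      (fun (st : Int × Int × List Int) i =>
        let backNum := PySem.List.pyGetD data (i - num) 0
        let backsum := st.1 - backNum
        let transferNum := PySem.List.pyGetD data (i - part) 0
        let backsum := backsum + transferNum
        let frontsum := st.2.1 - transferNum
        let frontNum := PySem.List.pyGetD data i 0
        let frontsum := frontsum + frontNum
        (backsum, frontsum, PySem.List.pySetD st.2.2 i (frontsum - backsum)))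
      (back, front, res)).2.2
    = (PySem.List.pyRange a (a + n) 1).foldl
      (fun res i => PySem.List.pySetD res i
        (base + (pvT data (i + 1) - pvT data offset)
          - 2 * (pvT data (i - part + 1) - pvT data (offset - part))
          + (pvT data (i - num + 1) - pvT data (offset - num)))) res := by
  intro n
  induction n with
  | zero => intro a back front res ha hl hinv; simp
  | succ n ih =>
    intro a back front res ha hl hinv
    have haL : a < (data.length : Int) := by push_cast at hl; omega
    rw [PySem.List.pyRange_one_cons (by push_cast; omega)]
    simp only [List.foldl_cons]
    have d1 := pvT_succ data (a - num) (by omega) (by omega)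
    have d2 := pvT_succ data (a - part) (by omega) (by omega)
    have d3 := pvT_succ data a (by omega) haL
    have hval : (front - PySem.List.pyGetD data (a - part) 0 + PySem.List.pyGetD data a 0)
        - (back - PySem.List.pyGetD data (a - num) 0 + PySem.List.pyGetD data (a - part) 0)
        = base + (pvT data (a + 1) - pvT data offset)
          - 2 * (pvT data (a - part + 1) - pvT data (offset - part))
          + (pvT data (a - num + 1) - pvT data (offset - num)) := by
      linarith [d1, d2, d3, hinv]
    have ecast : ((n + 1 : Nat) : Int) = ((n : Nat) : Int) + 1 := by push_cast; ring
    have e1 : a + (((n : Nat) : Int) + 1) = (a + 1) + ((n : Nat) : Int) := by ring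
    rw [ecast, e1]
    rw [hval]
    have hinv' : (front - PySem.List.pyGetD data (a - part) 0 + PySem.List.pyGetD data a 0)
        - (back - PySem.List.pyGetD data (a - num) 0 + PySem.List.pyGetD data (a - part) 0)
        = base + (pvT data (a + 1) - pvT data offset)
          - 2 * (pvT data (a + 1 - part) - pvT data (offset - part))
          + (pvT data (a + 1 - num) - pvT data (offset - num)) := by
      have f1 : a + 1 - part = a - part + 1 := by ring
      have f2 : a + 1 - num = a - num + 1 := by ring
      rw [f1, f2]; exact hval
    exact ih (a + 1)
      (back - PySem.List.pyGetD data (a - num) 0 + PySem.List.pyGetD data (a - part) 0)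
      (front - PySem.List.pyGetD data (a - part) 0 + PySem.List.pyGetD data a 0)
      (PySem.List.pySetD res a _)
      (by omega) (by push_cast at hl ⊢; omega) hinv'

/-- `pv_loop_eq` with the loop running from `offset` to `len(data)` directly. -/
theorem pv_loop_eq' (data : List Int) (num part offset base : Int)
    (h0p : 0 ≤ part) (hpn : part ≤ num) (hno : num ≤ offset)
    (back front : Int) (res : List Int) (hinv : front - back = base) :
    ((PySem.List.pyRange offset (data.length : Int) 1).foldl
      (fun (st : Int × Int × List Int) i =>
        let backNum := PySem.List.pyGetD data (i - num) 0
        let backsum := st.1 - backNum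
        let transferNum := PySem.List.pyGetD data (i - part) 0
        let backsum := backsum + transferNum
        let frontsum := st.2.1 - transferNum
        let frontNum := PySem.List.pyGetD data i 0
        let frontsum := frontsum + frontNum
        (backsum, frontsum, PySem.List.pySetD st.2.2 i (frontsum - backsum)))
      (back, front, res)).2.2
    = (PySem.List.pyRange offset (data.length : Int) 1).foldl
      (fun res i => PySem.List.pySetD res i
        (base + (pvT data (i + 1) - pvT data offset)
          - 2 * (pvT data (i - part + 1) - pvT data (offset - part))
          + (pvT data (i - num + 1) - pvT data (offset - num)))) res := by
  by_cases h : offset ≤ (data.length : Int)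
  · have hn : (data.length : Int) = offset + ((((data.length : Int) - offset).toNat : Nat) : Int) := by omega
    rw [hn]
    exact pv_loop_eq data num part offset base h0p hpn hno _ offset back front res le_rfl
      (by omega) (by rw [hinv]; ring)
  · rw [PySem.List.pyRange_one_eq_nil (by omega)]
    simp

theorem pv_A_canon (num : Int) (data : List Int) (result : List Int) (hn0 : 0 ≤ num)
    (hbound : 0 < PySem.Int.floordiv num 2 →
      max num (result.length : Int) - num + 2 * PySem.Int.floordiv num 2 ≤ (data.length : Int)) :
    calculateColumnRalphsMA num data result = pvCanon num data result := by
  unfold calculateColumnRalphsMA pvCanon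
  dsimp only
  have hfd : PySem.Int.floordiv num 2 = num / 2 :=
    PySem.Int.floordiv_eq_ediv_of_pos (by norm_num)
  have h0p : 0 ≤ PySem.Int.floordiv num 2 := by omega
  have hpn : PySem.Int.floordiv num 2 ≤ num := by omega
  have hno : num ≤ max num (result.length : Int) := le_max_left _ _
  by_cases hp : 0 < PySem.Int.floordiv num 2
  · have hb := hbound hp
    simp only [if_pos hp]
    rw [PySem.List.foldl_prod_mk
      (f := fun (s : Int) i => s + PySem.List.pyGetD data (i + max num (result.length : Int) - num) 0)
      (g := fun (s : Int) i => s + PySem.List.pyGetD data (i + PySem.Int.floordiv num 2 + max num (result.length : Int) - num) 0)]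
    dsimp only
    have e1 : (fun (s : Int) i => s + PySem.List.pyGetD data (i + max num (result.length : Int) - num) 0)
        = fun (s : Int) i => s + PySem.List.pyGetD data (i + (max num (result.length : Int) - num)) 0 := by
      funext s i
      have : i + max num (result.length : Int) - num = i + (max num (result.length : Int) - num) := by ring
      rw [this]
    have e2 : (fun (s : Int) i => s + PySem.List.pyGetD data (i + PySem.Int.floordiv num 2 + max num (result.length : Int) - num) 0)
        = fun (s : Int) i => s + PySem.List.pyGetD data (i + (PySem.Int.floordiv num 2 + max num (result.length : Int) - num)) 0 := by
      funext s i
      have : i + PySem.Int.floordiv num 2 + max num (result.length : Int) - num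
          = i + (PySem.Int.floordiv num 2 + max num (result.length : Int) - num) := by ring
      rw [this]
    rw [e1, e2]
    rw [pv_sum_loop' data (PySem.Int.floordiv num 2) (max num (result.length : Int) - num) 0 h0p (by omega) (by omega)]
    rw [pv_sum_loop' data (PySem.Int.floordiv num 2) (PySem.Int.floordiv num 2 + max num (result.length : Int) - num) 0 h0p (by omega) (by omega)]
    simp only [zero_add]
    have a1 : PySem.Int.floordiv num 2 + (PySem.Int.floordiv num 2 + max num (result.length : Int) - num)
        = max num (result.length : Int) - num + 2 * PySem.Int.floordiv num 2 := by ring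
    have a2 : PySem.Int.floordiv num 2 + max num (result.length : Int) - num
        = max num (result.length : Int) - num + PySem.Int.floordiv num 2 := by ring
    have a3 : PySem.Int.floordiv num 2 + (max num (result.length : Int) - num)
        = max num (result.length : Int) - num + PySem.Int.floordiv num 2 := by ring
    rw [a1, a2, a3]
    exact pv_loop_eq' data num (PySem.Int.floordiv num 2) (max num (result.length : Int)) _
      h0p hpn hno _ _ _ (by ring)
  · simp only [if_neg hp]
    rw [PySem.List.pyRange_one_eq_nil (by omega : PySem.Int.floordiv num 2 ≤ 0)]
    dsimp only [List.foldl_nil]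
    rw [(by ring : (0 : Int) - 0 = 0)]
    exact pv_loop_eq' data num (PySem.Int.floordiv num 2) (max num (result.length : Int)) 0
      h0p hpn hno _ _ _ (by ring)

theorem pv_B_canon (num : Int) (data : List Int) (result : List Int) (hn0 : 0 ≤ num)
    (hbound : 0 < PySem.Int.floordiv num 2 →
      max num (result.length : Int) - num + 2 * PySem.Int.floordiv num 2 ≤ (data.length : Int)) :
    calculateColumnRalphsMA_alt num data result = pvCanon num data result := by
  unfold calculateColumnRalphsMA_alt pvCanon
  dsimp only
  have hfd : PySem.Int.floordiv num 2 = num / 2 :=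
    PySem.Int.floordiv_eq_ediv_of_pos (by norm_num)
  have h0p : 0 ≤ PySem.Int.floordiv num 2 := by omega
  have hpn : PySem.Int.floordiv num 2 ≤ num := by omega
  have hno : num ≤ max num (result.length : Int) := le_max_left _ _
  have hVeq : (if 0 < PySem.Int.floordiv num 2 then
        PySem.List.pyGetD (data.foldl (fun acc x => acc ++ [PySem.List.pyGetD acc (-1) 0 + x]) [0])
            (max num (result.length : Int) - num + 2 * PySem.Int.floordiv num 2) 0
          - PySem.List.pyGetD (data.foldl (fun acc x => acc ++ [PySem.List.pyGetD acc (-1) 0 + x]) [0])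
            (max num (result.length : Int) - num + PySem.Int.floordiv num 2) 0
          - (PySem.List.pyGetD (data.foldl (fun acc x => acc ++ [PySem.List.pyGetD acc (-1) 0 + x]) [0])
            (max num (result.length : Int) - num + PySem.Int.floordiv num 2) 0
          - PySem.List.pyGetD (data.foldl (fun acc x => acc ++ [PySem.List.pyGetD acc (-1) 0 + x]) [0])
            (max num (result.length : Int) - num) 0)
      else 0)
      = (if 0 < PySem.Int.floordiv num 2 then
        pvT data (max num (result.length : Int) - num + 2 * PySem.Int.floordiv num 2)
          - pvT data (max num (result.length : Int) - num + PySem.Int.floordiv num 2)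
          - (pvT data (max num (result.length : Int) - num + PySem.Int.floordiv num 2)
          - pvT data (max num (result.length : Int) - num))
      else 0) := by
    by_cases hp : 0 < PySem.Int.floordiv num 2
    · have hb := hbound hp
      simp only [if_pos hp]
      rw [pvP_get data _ (by omega) (by omega), pvP_get data _ (by omega) (by omega),
        pvP_get data _ (by omega) (by omega)]
    · simp only [if_neg hp]
  rw [hVeq]
  refine PySem.List.foldl_congr_mem _ _ _ _ ?_
  intro acc x hx
  have hm := (PySem.List.mem_pyRange_one).1 hx
  rw [pvP_get data _ (by omega) (by omega), pvP_get data _ (by omega) (by omega),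
    pvP_get data _ (by omega) (by omega), pvP_get data _ (by omega) (by omega),
    pvP_get data _ (by omega) (by omega), pvP_get data _ (by omega) (by omega)]

-- ===== VERDICT (by name: the statement is the Claim_ definition above) =====
theorem calculateColumnRalphsMA_spec : Claim_equal_calculateColumnRalphsMA := by
  intro num data result hdom hpre
  unfold Pre_calculateColumnRalphsMA at hpre
  unfold Spec_calculateColumnRalphsMA
  have hfd : PySem.Int.floordiv num 2 = num / 2 :=
    PySem.Int.floordiv_eq_ediv_of_pos (by norm_num)
  by_cases hneg : num < 0
  · have hLR : (data.length : Int) ≤ (result.length : Int) := by rcases hpre with h|h|h <;> omega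
    unfold calculateColumnRalphsMA calculateColumnRalphsMA_alt
    dsimp only
    rw [PySem.List.pyRange_one_eq_nil (show PySem.Int.floordiv num 2 ≤ 0 by omega)]
    rw [PySem.List.pyRange_one_eq_nil
      (show (data.length : Int) ≤ max num (result.length : Int) by
        have := le_max_right num (result.length : Int); omega)]
    dsimp only [List.foldl_nil]
    rw [if_neg (show ¬ (0 < PySem.Int.floordiv num 2) by omega)]
    norm_num
  · have hn0 : 0 ≤ num := by omega
    have hbound : 0 < PySem.Int.floordiv num 2 →
        max num (result.length : Int) - num + 2 * PySem.Int.floordiv num 2 ≤ (data.length : Int) := by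
      intro hp
      rcases hpre with h|h|h
      · omega
      · omega
      · omega
    rw [pv_A_canon num data result hn0 hbound, pv_B_canon num data result hn0 hbound]
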